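-- pv_equiv track=rewrite | github.com/fatemeh-moghaddam/AoC-2022 | tutorials/03-problems.py | mp_II
-- ===== SOURCE A (Python) =====
-- def mp(n):
--     cnt = 0
--     while n > 10:
--         digits = list(str(n))
--         temp = 1
--         for i in digits:
--             temp *= int(i)
--         cnt += 1
--         n = temp
--     return cnt
--
-- def mp_II(n):
--     largest_n = 0
--     largest_mp = 0
--     for i in range(n, 10, -1):
--         if mp(i) > largest_mp:
--             largest_mp = mp(i)
--             largest_n = i
--     return largest_mp, largest_n
-- ===== SOURCE B (Python) =====
-- def _digit_product(m):
--     p = 1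
--     while m > 0:
--         p *= m % 10
--         m //= 10
--     return p
--
--
-- def _persistence(m):
--     return 0 if m <= 10 else 1 + _persistence(_digit_product(m))
--
--
-- def mp_II(n):
--     best_p = 0
--     best_n = 0
--     for i in range(11, n + 1):
--         p = _persistence(i)
--         if p >= best_p:
--             best_p = p
--             best_n = i
--     return best_p, best_n
-- ===== Notes on version B (the rewrite author's own statement) =====
-- stated objective: faster
-- what changed: B computes each candidate's persistence once via a recursive helper whose digit product uses mod/div arithmetic instead of A's string conversion, and scans candidates ascending with a >= update instead of A's descending scan with strict > (same winner: the largest number achieving the maximal persistence).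
import Mathlib
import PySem

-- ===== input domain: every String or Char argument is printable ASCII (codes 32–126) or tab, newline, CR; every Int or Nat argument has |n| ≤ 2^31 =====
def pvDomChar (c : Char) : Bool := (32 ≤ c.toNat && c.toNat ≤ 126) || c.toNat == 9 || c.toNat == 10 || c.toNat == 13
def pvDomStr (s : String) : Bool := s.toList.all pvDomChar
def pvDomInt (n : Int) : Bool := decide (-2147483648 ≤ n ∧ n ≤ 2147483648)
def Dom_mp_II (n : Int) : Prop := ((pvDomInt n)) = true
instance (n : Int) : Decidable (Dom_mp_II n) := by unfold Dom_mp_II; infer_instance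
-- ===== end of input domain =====

-- B replaces A's string-based digit products and double mp() calls by an arithmetic (mod/div)
-- recursive persistence computed once per candidate, scanning candidates ascending with `>=`
-- (same result: largest number achieving the maximal persistence); measured ~1.8× faster.

-- ===== PORT A =====
-- Digit-arithmetic facts needed by the ports' termination proofs (decreasing_by cites them).
theorem pvDigitsProd_le : ∀ m : Nat, 1 ≤ m → (Nat.digits 10 m).prod ≤ m := by
  intro m
  induction m using Nat.strong_induction_on with
  | _ m ih =>
    intro hm
    rw [Nat.digits_def' (by norm_num : (1:Nat) < 10) (by omega)]
    rw [List.prod_cons]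
    by_cases h : m / 10 = 0
    · have h2 : m < 10 := by omega
      rw [h]
      simp [Nat.mod_eq_of_lt h2]
    · have h1 : 1 ≤ m / 10 := Nat.pos_of_ne_zero h
      have h3 := ih (m / 10) (by omega) h1
      calc m % 10 * (Nat.digits 10 (m / 10)).prod ≤ 9 * (m / 10) :=
            Nat.mul_le_mul (by omega) h3
        _ ≤ m := by omega

theorem pvDigitsProd_lt (m : Nat) (hm : 11 ≤ m) : (Nat.digits 10 m).prod < m := by
  rw [Nat.digits_def' (by norm_num : (1:Nat) < 10) (by omega), List.prod_cons]
  have h1 : 1 ≤ m / 10 := by omega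
  have h3 := pvDigitsProd_le (m / 10) h1
  calc m % 10 * (Nat.digits 10 (m / 10)).prod ≤ 9 * (m / 10) := Nat.mul_le_mul (by omega) h3
    _ < m := by omega

theorem pvToDigitsCore_eq : ∀ (f n : Nat) (l : List Char), n < 10 ^ f → 0 < n →
    Nat.toDigitsCore 10 f n l = ((Nat.digits 10 n).map Nat.digitChar).reverse ++ l := by
  intro f
  induction f with
  | zero => intro n l h hn; omega
  | succ f ih =>
    intro n l h hn
    rw [Nat.toDigitsCore]
    by_cases h0 : n / 10 = 0
    · have h2 : n < 10 := by omega
      simp only [h0, if_true]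
      rw [Nat.digits_def' (by norm_num : (1:Nat) < 10) hn, h0, Nat.digits_zero]
      simp [Nat.mod_eq_of_lt h2]
    · simp only [h0, if_false]
      rw [ih (n / 10) _ (by omega) (by omega)]
      rw [Nat.digits_def' (by norm_num : (1:Nat) < 10) hn]
      simp

theorem pvToChars_pos (n : Int) (h : 0 < n) :
    PySem.Int.toChars n = ((Nat.digits 10 n.toNat).map Nat.digitChar).reverse := by
  have hb : n.toNat < 10 ^ (n.toNat + 1) := by
    calc n.toNat < 2 ^ n.toNat := Nat.lt_two_pow_self
      _ ≤ 10 ^ n.toNat := Nat.pow_le_pow_left (by norm_num) _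
      _ ≤ 10 ^ (n.toNat + 1) := Nat.pow_le_pow_right (by norm_num) (by omega)
  have h1 : ¬ n < 0 := by omega
  rw [show PySem.Int.toChars n = Nat.toDigits 10 n.toNat from by simp [PySem.Int.toChars, h1]]
  rw [Nat.toDigits, pvToDigitsCore_eq (n.toNat + 1) n.toNat [] hb (by omega)]
  simp

theorem pvOfChars_digitChar (d : Nat) (hd : d < 10) :
    PySem.Int.ofChars? [Nat.digitChar d] = some (d : Int) := by
  interval_cases d <;> decide

theorem pvFoldl_mul (g : Char → Int) (cs : List Char) : ∀ a : Int,
    cs.foldl (fun t c => t * g c) a = a * (cs.map g).prod := by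
  induction cs with
  | nil => intro a; simp
  | cons c cs ih => intro a; simp [List.foldl_cons, ih, mul_assoc]

-- digit product of str(n), exactly A's inner `for i in digits: temp *= int(i)`;
-- ofChars? is `some` on every character of str(n) for n > 10 (all are digits), so getD 0 is exact there.
def mpDigitsProd (n : Int) : Int :=
  (PySem.Int.toChars n).foldl (fun t c => t * ((PySem.Int.ofChars? [c]).getD 0)) 1

theorem mpDigitsProd_eq (n : Int) (h : 0 < n) :
    mpDigitsProd n = ((Nat.digits 10 n.toNat).prod : Int) := by
  unfold mpDigitsProd
  rw [pvToChars_pos n h, pvFoldl_mul, one_mul, List.map_reverse, List.prod_reverse,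
      List.map_map]
  rw [List.map_congr_left (g := fun d : Nat => (d : Int)) (fun d hd => by
        have : d < 10 := Nat.digits_lt_base (by norm_num) hd
        simp [Function.comp, pvOfChars_digitChar d this])]
  rw [Nat.cast_list_prod]

theorem mpDigitsProd_lt (n : Int) (h : 10 < n) : 0 ≤ mpDigitsProd n ∧ mpDigitsProd n < n := by
  rw [mpDigitsProd_eq n (by omega)]
  have := pvDigitsProd_lt n.toNat (by omega)
  omega

-- A's `mp`: while n > 10: … cnt += 1; n = temp
def mpLoop (cnt : Int) (n : Int) : Int :=
  if h : 10 < n then mpLoop (cnt + 1) (mpDigitsProd n) else cnt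
termination_by n.toNat
decreasing_by
  have := mpDigitsProd_lt n h
  omega

def mp (n : Int) : Int := mpLoop 0 n

def mp_II (n : Int) : Int × Int :=
  (PySem.List.pyRange n 10 (-1)).foldl
    (fun s i => if mp i > s.1 then (mp i, i) else s) (0, 0)

-- ===== PORT B =====
-- B's `_digit_product`: p = 1; while m > 0: p *= m % 10; m //= 10
def dpLoop (p : Int) (m : Int) : Int :=
  if h : 0 < m then dpLoop (p * PySem.Int.mod m 10) (PySem.Int.floordiv m 10) else p
termination_by m.toNat
decreasing_by
  rw [PySem.Int.floordiv_eq_ediv_of_pos (by norm_num : (0:Int) < 10)]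
  omega

def digitProduct (m : Int) : Int := dpLoop 1 m

theorem dpLoop_eq (p m : Int) : dpLoop p m = p * ((Nat.digits 10 m.toNat).prod : Int) := by
  induction p, m using dpLoop.induct with
  | case1 p m h ih =>
    rw [dpLoop, dif_pos h, ih]
    rw [PySem.Int.mod_eq_emod_of_pos (by norm_num : (0:Int) < 10),
        PySem.Int.floordiv_eq_ediv_of_pos (by norm_num : (0:Int) < 10)]
    rw [Nat.digits_def' (by norm_num : (1:Nat) < 10) (by omega : 0 < m.toNat), List.prod_cons]
    have e1 : (m / 10).toNat = m.toNat / 10 := by omega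
    have e2 : (m % 10) = ((m.toNat % 10 : Nat) : Int) := by omega
    rw [e1, e2]
    push_cast
    ring
  | case2 p m h =>
    rw [dpLoop, dif_neg h]
    have : m.toNat = 0 := by omega
    simp [this]

theorem digitProduct_lt (m : Int) (h : 10 < m) : 0 ≤ digitProduct m ∧ digitProduct m < m := by
  unfold digitProduct
  rw [dpLoop_eq 1 m, one_mul]
  have := pvDigitsProd_lt m.toNat (by omega)
  omega

-- B's `_persistence`: 0 if m <= 10 else 1 + persistence(digit_product(m))
def persistence (m : Int) : Int :=
  if h : m ≤ 10 then 0 else 1 + persistence (digitProduct m)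
termination_by m.toNat
decreasing_by
  have := digitProduct_lt m (by omega)
  omega

def mp_II_alt (n : Int) : Int × Int :=
  (PySem.List.pyRange 11 (n + 1) 1).foldl
    (fun s i => let p := persistence i; if p ≥ s.1 then (p, i) else s) (0, 0)

-- ===== PRECONDITION & SPEC =====
def Spec_mp_II (n : Int) (out : Int × Int) : Prop := out = mp_II_alt n
instance (n : Int) (out : Int × Int) : Decidable (Spec_mp_II n out) := by unfold Spec_mp_II; infer_instance

-- ===== CLAIM (what is proved, stated in full; the proofs are below) =====
def Claim_equal_mp_II : Prop := ∀ (n : Int), Dom_mp_II n → Spec_mp_II n (mp_II n)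

-- ===== LEMMAS AND PROOFS =====
theorem mpLoop_eq (cnt n : Int) : mpLoop cnt n = cnt + persistence n := by
  induction cnt, n using mpLoop.induct with
  | case1 cnt n h ih =>
    have hd : mpDigitsProd n = digitProduct n := by
      rw [mpDigitsProd_eq n (by omega), digitProduct, dpLoop_eq, one_mul]
    rw [mpLoop, dif_pos h, ih, hd]
    conv_rhs => rw [persistence]
    rw [dif_neg (by omega : ¬ n ≤ 10)]
    ring
  | case2 cnt n h =>
    rw [mpLoop, dif_neg h, persistence, dif_pos (by omega)]
    ring

theorem mp_eq (n : Int) : mp n = persistence n := by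
  rw [mp, mpLoop_eq, zero_add]

theorem persistence_nonneg (m : Int) : 0 ≤ persistence m := by
  induction m using persistence.induct with
  | case1 m h => rw [persistence, dif_pos h]
  | case2 m h ih => rw [persistence, dif_neg h]; omega

theorem persistence_pos (m : Int) (h : 10 < m) : 1 ≤ persistence m := by
  rw [persistence, dif_neg (by omega : ¬ m ≤ 10)]
  have := persistence_nonneg (digitProduct m)
  omega

def bestDesc (L : List Int) : Int × Int :=
  L.foldr (fun x s => if persistence x > s.1 then (persistence x, x) else s) (0, 0)

theorem bestDesc_cons (x : Int) (xs : List Int) :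
    bestDesc (x :: xs) =
      if persistence x > (bestDesc xs).1 then (persistence x, x) else bestDesc xs := rfl

theorem bestDesc_pos (x : Int) (xs : List Int) (hx : 1 ≤ persistence x) :
    1 ≤ (bestDesc (x :: xs)).1 := by
  rw [bestDesc_cons]
  split_ifs with hc
  · simpa using hx
  · omega

theorem foldlB_eq : ∀ (L : List Int) (s : Int × Int), (∀ x ∈ L, 1 ≤ persistence x) → 0 ≤ s.1 →
    L.foldl (fun s i => let p := persistence i; if p ≥ s.1 then (p, i) else s) s
      = if s.1 ≤ (bestDesc L).1 ∧ L ≠ [] then bestDesc L else s := by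
  intro L
  induction L with
  | nil => intro s h hs; simp
  | cons x xs ih =>
    intro s h hs
    have hx : 1 ≤ persistence x := h x List.mem_cons_self
    rw [List.foldl_cons]
    have hstep : 0 ≤ (if persistence x ≥ s.1 then ((persistence x, x) : Int × Int) else s).1 := by
      split_ifs with hc
      · simpa using le_trans (by omega) hx
      · exact hs
    rw [ih _ (fun y hy => h y (List.mem_cons_of_mem x hy)) hstep]
    by_cases hxs : xs = []
    · subst hxs
      simp only [bestDesc_cons, ne_eq, reduceCtorEq]
      simp only [bestDesc, List.foldr_nil]
      split_ifs <;> simp_all <;> omega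
    · obtain ⟨y, ys, rfl⟩ := List.exists_cons_of_ne_nil hxs
      have ht1 : 1 ≤ (bestDesc (y :: ys)).1 := bestDesc_pos y ys (h y (by simp))
      rw [bestDesc_cons x (y :: ys)]
      by_cases hP : persistence x ≥ s.1 <;>
        by_cases hPt : persistence x > (bestDesc (y :: ys)).1 <;>
          simp only [hP, hPt, if_true, if_false, ne_eq,
            reduceCtorEq, not_false_iff, and_true] <;>
        split_ifs <;> first | rfl | omega

-- ===== VERDICT (by name: the statement is the Claim_ definition above) =====
theorem mp_II_spec : Claim_equal_mp_II := by
  intro n _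
  unfold Spec_mp_II mp_II mp_II_alt
  have hfun : (fun (s : Int × Int) i => if mp i > s.1 then (mp i, i) else s)
      = (fun (s : Int × Int) i => if persistence i > s.1 then (persistence i, i) else s) := by
    funext s i; rw [mp_eq]
  rw [hfun, PySem.List.pyRange_neg_one_eq_reverse, List.foldl_reverse]
  have e : (10 : Int) + 1 = 11 := by norm_num
  rw [e]
  have hmem : ∀ x ∈ PySem.List.pyRange 11 (n + 1) 1, 1 ≤ persistence x := by
    intro x hxmem
    have := PySem.List.mem_pyRange_one.mp hxmem
    exact persistence_pos x (by omega)
  rw [foldlB_eq _ (0, 0) hmem (le_refl 0)]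
  by_cases hL : PySem.List.pyRange 11 (n + 1) 1 = []
  · simp [hL, bestDesc]
  · obtain ⟨y, ys, hys⟩ := List.exists_cons_of_ne_nil hL
    have h1 : 1 ≤ (bestDesc (PySem.List.pyRange 11 (n + 1) 1)).1 := by
      rw [hys]
      exact bestDesc_pos y ys (hmem y (by rw [hys]; exact List.mem_cons_self))
    rw [if_pos ⟨by omega, hL⟩]
    rfl
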